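-- pv_equiv track=rewrite | github.com/dusskdus/CodingTest_Python | 프로그래머스/lv2/92335. k진수에서 소수 개수 구하기/k진수에서 소수 개수 구하기.py | solution
-- ===== SOURCE A (Python) =====
-- import string
-- import math
--
-- def convert(num, base):
--     number = string.digits + string.ascii_uppercase #10진수 출력+영어 대문자 출력
--     q, r = divmod(num, base)
--     return convert(q, base) + number[r] if q else number[r]
--
-- def Prime(n):
--     if n == 1:
--             return False
--     for i in range(2, int(math.sqrt(n)) + 1): #정수의 제곱근 리턴
--         if n%i == 0:
--             return False
--     return True
--
-- def solution(n, k):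
--     num = []
--     answer = 0
--     num = convert(n,k)
--     num = num.split("0")
--     for i in num:
--         if i != "":
--             if Prime(int(i)):
--                 answer += 1
--     return answer
-- ===== SOURCE B (Python) =====
-- import string
--
--
-- def _prime(v):
--     if v == 1:
--         return False
--     i = 2
--     while i * i <= v:
--         if v % i == 0:
--             return False
--         i += 1
--     return True
--
--
-- def solution(n, k):
--     digit_chars = string.digits + string.ascii_uppercase
--     count = 0
--     piece = ""
--     while n:
--         n, d = divmod(n, k)
--         if d:
--             piece = digit_chars[d] + piece
--         else:
--             if piece and _prime(int(piece)):
--                 count += 1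
--             piece = ""
--     if piece and _prime(int(piece)):
--         count += 1
--     return count
-- ===== Notes on version B (the rewrite author's own statement) =====
-- stated objective: alternative
-- what changed: A builds the whole base-k string by recursion, splits it on '0' and counts prime pieces; B is a single streaming pass over the divmod digit sequence that keeps only the current run of nonzero digit characters and tests each completed run on the fly (never materializing the full representation or calling split), with trial division bounded by i*i <= v instead of a precomputed square root.
-- outside the precondition, e.g. on solution(0, 1): A returns 0, B returns 0; on solution(0, -5): A returns 0, B returns 0
import Mathlib
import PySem

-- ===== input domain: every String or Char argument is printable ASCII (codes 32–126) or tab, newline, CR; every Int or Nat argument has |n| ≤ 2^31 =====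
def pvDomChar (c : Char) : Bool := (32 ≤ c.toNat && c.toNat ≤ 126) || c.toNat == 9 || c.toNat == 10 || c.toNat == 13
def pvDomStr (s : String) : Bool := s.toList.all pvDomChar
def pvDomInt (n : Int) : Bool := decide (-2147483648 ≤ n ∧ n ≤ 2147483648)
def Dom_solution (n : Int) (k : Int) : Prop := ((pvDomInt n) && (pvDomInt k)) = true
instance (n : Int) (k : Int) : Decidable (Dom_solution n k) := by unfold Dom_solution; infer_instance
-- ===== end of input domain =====

-- B replaces A's build-the-whole-string-then-split pipeline by a single streaming pass over the
-- base-k digits (divmod, least-significant first) that maintains only the current run of nonzero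
-- digit characters and tests each completed run on the fly; its trial division uses i*i <= v
-- instead of a precomputed square root (objective: alternative; same asymptotic cost).

-- ===== PORT A =====

-- string.digits + string.ascii_uppercase
def pvAlphabet : List Char := "0123456789ABCDEFGHIJKLMNOPQRSTUVWXYZ".toList

-- A's `convert(num, base)`: recursion on num; fuel bounds the recursion depth (num.toNat + 1
-- suffices for 0 ≤ num, 2 ≤ base — the inputs Pre_ admits; fuel is a totality guard only).
-- `number[r]` is PySem.List.pyGet?; `.getD ' '` totalizes the IndexError case, excluded by Pre_.
def convertA (fuel : Nat) (num base : Int) : List Char :=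
  match fuel with
  | 0 => []
  | f + 1 =>
    let q := PySem.Int.floordiv num base
    let r := PySem.Int.mod num base
    let c := (PySem.List.pyGet? pvAlphabet r).getD ' '
    if q ≠ 0 then convertA f q base ++ [c] else [c]

-- A's `Prime(n)`: int(math.sqrt(n)) is ported as Int.sqrt — exact whenever Python's float sqrt
-- agrees with the integer square root (in particular for all n < 2^52); the early-return
-- divisor loop is the `all` of its body over the same range.
def primeA (m : Int) : Bool :=
  if m = 1 then false
  else (PySem.List.pyRange 2 (Int.sqrt m + 1) 1).all (fun i => PySem.Int.mod m i != 0)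

-- A's `solution`: build the base-k string, split on "0", count prime pieces.
-- Strings are carried as List Char (PySem.Chars side); int(i) is PySem.Int.ofChars?,
-- `.getD 0` totalizes the ValueError case, excluded by Pre_ (all digits below 10 ⇒ digit pieces only).
def solution (n : Int) (k : Int) : Int :=
  (PySem.Chars.splitOn (convertA (n.toNat + 1) n k) ['0']).foldl
    (fun answer i =>
      if i ≠ [] then
        if primeA ((PySem.Int.ofChars? i).getD 0) then answer + 1 else answer
      else answer) 0

-- ===== PORT B =====

-- string.digits + string.ascii_uppercase (B's `digit_chars`)
def pvDigitsB : List Char := "0123456789ABCDEFGHIJKLMNOPQRSTUVWXYZ".toList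

-- B's `_prime(v)` trial-division loop `i = 2; while i * i <= v: …; i += 1`; fuel is a totality
-- guard only (v.toNat + 1 iterations are more than the loop can run).
def primeLoopB (fuel : Nat) (v i : Int) : Bool :=
  match fuel with
  | 0 => true
  | f + 1 =>
    if i * i ≤ v then
      if PySem.Int.mod v i = 0 then false else primeLoopB f v (i + 1)
    else true

def primeB (v : Int) : Bool :=
  if v = 1 then false else primeLoopB (v.toNat + 1) v 2

-- B's `while n:` loop: one streaming pass over the base-k digits, least significant first,
-- carrying (count, piece); `piece = digit_chars[d] + piece` prepends, so piece is always the
-- current run of nonzero digit characters in most-significant-first order.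
-- fuel is a totality guard (n.toNat + 1 suffices on the inputs Pre_ admits).
def runB (fuel : Nat) (n k cnt : Int) (piece : List Char) : Int :=
  match fuel with
  | 0 => cnt
  | f + 1 =>
    if n ≠ 0 then
      let d := PySem.Int.mod n k
      if d ≠ 0 then
        runB f (PySem.Int.floordiv n k) k cnt (((PySem.List.pyGet? pvDigitsB d).getD ' ') :: piece)
      else
        runB f (PySem.Int.floordiv n k) k
          (if (!piece.isEmpty) && primeB ((PySem.Int.ofChars? piece).getD 0) then cnt + 1 else cnt)
          []
    else
      if (!piece.isEmpty) && primeB ((PySem.Int.ofChars? piece).getD 0) then cnt + 1 else cnt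

def solution_alt (n : Int) (k : Int) : Int := runB (n.toNat + 1) n k 0 []

-- ===== PRECONDITION & SPEC =====
-- Exactly the inputs on which Python A returns: 0 ≤ n, 2 ≤ k, and every base-k digit of n is
-- below 10 (n ≤ 2^31 < k^32 on Dom, so the first 32 digits are all of them; for k ≤ 10 this
-- digit condition is automatic). Otherwise A raises or diverges: n < 0 or k ≤ 1 give infinite
-- recursion (k = 0 a ZeroDivisionError), a digit ≥ 36 an IndexError, and a letter digit makes
-- int() raise ValueError; B raises or diverges on the same inputs. The one returning corner
-- also excluded is n = 0 with k ≤ 1 or k < 0, where divmod(0, k) stops A at once and both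
-- programs return 0 — Pre_ keeps the natural domain of bases k ≥ 2.
def Pre_solution (n : Int) (k : Int) : Prop :=
  0 ≤ n ∧ 2 ≤ k ∧ ∀ j : Fin 32, n / k ^ (j : Nat) % k < 10
instance (n : Int) (k : Int) : Decidable (Pre_solution n k) := by unfold Pre_solution; infer_instance
def pvWitness_solution : Int × Int := (7, 3)
def Spec_solution (n : Int) (k : Int) (out : Int) : Prop := out = solution_alt n k
instance (n : Int) (k : Int) (out : Int) : Decidable (Spec_solution n k out) := by unfold Spec_solution; infer_instance

-- ===== CLAIM (what is proved, stated in full; the proofs are below) =====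
def Claim_equal_solution : Prop := ∀ (n : Int) (k : Int), Dom_solution n k → Pre_solution n k → Spec_solution n k (solution n k)

-- ===== LEMMAS AND PROOFS =====

-- i * i ≤ m iff i ≤ ⌊√m⌋, for 1 ≤ i (the bracket behind both trial-division bounds).
theorem sq_le_iff_le_sqrt (m i : Int) (h2 : 1 ≤ i) : i * i ≤ m ↔ i ≤ Int.sqrt m := by
  unfold Int.sqrt
  by_cases hm : 0 ≤ m
  · have hi : (i.toNat : Int) = i := Int.toNat_of_nonneg (by omega)
    have h1 : i * i ≤ m ↔ i.toNat * i.toNat ≤ m.toNat := by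
      constructor
      · intro h
        have : ((i.toNat * i.toNat : Nat) : Int) ≤ ((m.toNat : Nat) : Int) := by
          push_cast; rw [hi]; omega
        exact_mod_cast this
      · intro h
        have : ((i.toNat * i.toNat : Nat) : Int) ≤ ((m.toNat : Nat) : Int) := by exact_mod_cast h
        push_cast at this; rw [hi] at this; omega
    have h2' : i ≤ (Nat.sqrt m.toNat : Int) ↔ i.toNat ≤ Nat.sqrt m.toNat := by omega
    rw [h1, h2', Nat.le_sqrt]
  · constructor
    · intro h; nlinarith
    · intro h
      have h0 : m.toNat = 0 := by omega
      rw [h0] at h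
      simp [Nat.sqrt] at h
      omega

-- B's divisor loop computes A's `all` over range(2, sqrt + 1).
theorem primeLoopB_eq (m : Int) (fuel : Nat) :
    ∀ i : Int, 1 ≤ i → (Int.sqrt m + 1 - i).toNat < fuel →
      primeLoopB fuel m i = (PySem.List.pyRange i (Int.sqrt m + 1) 1).all
        (fun j => PySem.Int.mod m j != 0) := by
  induction fuel with
  | zero => intro i _ h; omega
  | succ f ih =>
    intro i hi hf
    unfold primeLoopB
    by_cases hsq : i * i ≤ m
    · have hle : i ≤ Int.sqrt m := (sq_le_iff_le_sqrt m i hi).mp hsq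
      rw [if_pos hsq, PySem.List.pyRange_one_cons (by omega), List.all_cons]
      by_cases hz : PySem.Int.mod m i = 0
      · simp [hz]
      · rw [if_neg hz, ih (i + 1) (by omega) (by omega)]
        simp [hz]
    · rw [if_neg hsq, PySem.List.pyRange_one_eq_nil
        (by
          have := (sq_le_iff_le_sqrt m i hi).not.mp hsq
          omega)]
      simp

-- The two primality tests agree on every integer.
theorem primeA_eq_primeB (m : Int) : primeA m = primeB m := by
  unfold primeA primeB
  by_cases h : m = 1
  · simp [h]
  · rw [if_neg h, if_neg h,
      primeLoopB_eq m (m.toNat + 1) 2 (by omega)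
        (by
          have hs : Int.sqrt m ≤ m ∨ Int.sqrt m = 0 := by
            by_cases hm : 0 ≤ m
            · left
              unfold Int.sqrt
              have := Nat.sqrt_le_self m.toNat
              omega
            · right
              unfold Int.sqrt
              have h0 : m.toNat = 0 := by omega
              rw [h0]
              simp [Nat.sqrt]
          omega)]

-- the common count predicate on a piece (B's `piece and _prime(int(piece))`)
def predB (p : List Char) : Bool :=
  (!p.isEmpty) && primeB ((PySem.Int.ofChars? p).getD 0)

-- A's counting fold over the piece list is a countP.
theorem fold_count (l : List (List Char)) (init : Int) :
    l.foldl
      (fun answer i =>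
        if i ≠ [] then
          if primeA ((PySem.Int.ofChars? i).getD 0) then answer + 1 else answer
        else answer) init
    = init + ((l.countP predB : Nat) : Int) := by
  induction l generalizing init with
  | nil => simp
  | cons x xs ih =>
    simp only [List.foldl_cons, List.countP_cons, ih]
    by_cases hx : x = []
    · simp [hx, predB]
    · by_cases hp : primeB ((PySem.Int.ofChars? x).getD 0)
      · simp only [hx, primeA_eq_primeB, hp, if_true, ne_eq, not_false_eq_true]
        simp [predB, hx, hp]
        ring
      · simp [hx, primeA_eq_primeB, hp, predB]

-- split-on-'0' as a plain structural recursion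
def splitL : List Char → List (List Char)
  | [] => [[]]
  | c :: rest =>
    if c = '0' then [] :: splitL rest
    else (c :: (splitL rest).headI) :: (splitL rest).tail

theorem splitL_ne_nil (l : List Char) : splitL l ≠ [] := by
  cases l with
  | nil => simp [splitL]
  | cons c rest => simp only [splitL]; split_ifs <;> simp

theorem splitL_cons_shape (l : List Char) : splitL l = (splitL l).headI :: (splitL l).tail := by
  cases h : splitL l with
  | nil => exact absurd h (splitL_ne_nil l)
  | cons a t => simp

def consHead (pre : List Char) : List (List Char) → List (List Char)
  | [] => [pre]
  | p :: ps => (pre ++ p) :: ps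

-- PySem's fueled splitOn worker, characterized against splitL (single-character separator '0').
theorem splitOn_go_eq (l : List Char) :
    ∀ (fuel : Nat) (cur : List Char) (acc : List (List Char)), l.length < fuel →
      PySem.Chars.splitOn.go ['0'] fuel l cur acc = acc.reverse ++ consHead cur.reverse (splitL l) := by
  induction l with
  | nil =>
    intro fuel cur acc h
    match fuel with
    | f + 1 => simp [PySem.Chars.splitOn.go, splitL, consHead]
  | cons c rest ih =>
    intro fuel cur acc h
    match fuel with
    | f + 1 =>
      rw [show PySem.Chars.splitOn.go ['0'] (f + 1) (c :: rest) cur acc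
          = if ['0'].isPrefixOf (c :: rest)
            then PySem.Chars.splitOn.go ['0'] f (List.drop 1 (c :: rest)) [] (cur.reverse :: acc)
            else PySem.Chars.splitOn.go ['0'] f rest (c :: cur) acc from rfl]
      by_cases hc : c = '0'
      · rw [if_pos (by simp [List.isPrefixOf, hc])]
        simp only [List.drop_succ_cons, List.drop_zero]
        rw [ih f [] (cur.reverse :: acc) (by simp only [List.length_cons] at h; omega)]
        rw [show splitL (c :: rest) = [] :: splitL rest by simp [splitL, hc]]
        rw [show consHead ([] : List Char).reverse (splitL rest) = splitL rest by
          rw [splitL_cons_shape rest]; simp [consHead]]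
        simp [consHead]
      · rw [if_neg (by simp [List.isPrefixOf]; exact fun h => hc h.symm)]
        rw [ih f (c :: cur) acc (by simp only [List.length_cons] at h; omega)]
        rw [show splitL (c :: rest) = (c :: (splitL rest).headI) :: (splitL rest).tail by
          simp [splitL, hc]]
        rw [splitL_cons_shape rest]
        simp [consHead]

theorem splitOn_eq_splitL (l : List Char) : PySem.Chars.splitOn l ['0'] = splitL l := by
  rw [show PySem.Chars.splitOn l ['0']
      = PySem.Chars.splitOn.go ['0'] (l.length + 1) l [] [] from rfl]
  rw [splitOn_go_eq l (l.length + 1) [] [] (by omega)]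
  rw [splitL_cons_shape l]
  simp [consHead]

-- appending one character on the right of the scanned string
def sApp (c : Char) : List (List Char) → List (List Char)
  | [] => [[c]]
  | [p] => [p ++ [c]]
  | p :: ps => p :: sApp c ps

theorem sApp_append (c : Char) (L : List (List Char)) (p : List Char) :
    sApp c (L ++ [p]) = L ++ [p ++ [c]] := by
  induction L with
  | nil => simp [sApp]
  | cons q L' ih =>
    cases L' with
    | nil => simp [sApp]
    | cons r L'' =>
      simp only [List.cons_append, sApp]
      rw [show r :: (L'' ++ [p]) = (r :: L'') ++ [p] from rfl, ih]
      simp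

theorem splitL_append (xs : List Char) (c : Char) :
    splitL (xs ++ [c]) = if c = '0' then splitL xs ++ [[]] else sApp c (splitL xs) := by
  induction xs with
  | nil => by_cases hc : c = '0' <;> simp [splitL, sApp, hc]
  | cons x xs' ih =>
    by_cases hx : x = '0'
    · simp only [List.cons_append, splitL, hx, if_true, ih]
      by_cases hc : c = '0'
      · simp [hc]
      · rw [if_neg hc, if_neg hc]
        rw [splitL_cons_shape xs']
        simp [sApp]
    · simp only [List.cons_append, splitL, hx, if_false, ih]
      by_cases hc : c = '0'
      · rw [if_pos hc, if_pos hc]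
        rw [splitL_cons_shape xs']
        simp
      · rw [if_neg hc, if_neg hc]
        rw [splitL_cons_shape xs']
        cases h : splitL xs' with
        | nil => exact absurd h (splitL_ne_nil xs')
        | cons a t =>
          cases t with
          | nil => simp [sApp]
          | cons b t' => simp [sApp]

-- scanning the reversed string: the pieces come out reversed piecewise and listwise
theorem splitL_reverse (ds : List Char) :
    splitL ds.reverse = ((splitL ds).map List.reverse).reverse := by
  induction ds with
  | nil => simp [splitL]
  | cons c rest ih =>
    rw [List.reverse_cons, splitL_append, ih]
    by_cases hc : c = '0'
    · simp [splitL, hc]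
    · rw [if_neg hc]
      rw [show splitL (c :: rest) = (c :: (splitL rest).headI) :: (splitL rest).tail by
        simp [splitL, hc]]
      rw [splitL_cons_shape rest, List.map_cons, List.map_cons, List.reverse_cons,
        List.reverse_cons, sApp_append]
      simp

-- the base-k digit characters of n, least significant first (the order B consumes them)
def chDigits (fuel : Nat) (n k : Int) : List Char :=
  match fuel with
  | 0 => []
  | f + 1 =>
    if n ≠ 0 then
      ((PySem.List.pyGet? pvAlphabet (PySem.Int.mod n k)).getD ' ')
        :: chDigits f (PySem.Int.floordiv n k) k
    else []

theorem chDigits_zero (fuel : Nat) (k : Int) : chDigits fuel 0 k = [] := by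
  cases fuel <;> simp [chDigits]

-- A's recursive conversion is those digits reversed (most significant first).
theorem convertA_eq_chDigits (fuel : Nat) :
    ∀ (n k : Int), 1 ≤ n → n.toNat < fuel → 2 ≤ k →
      convertA fuel n k = (chDigits fuel n k).reverse := by
  induction fuel with
  | zero => intro n _ _ h; omega
  | succ f ih =>
    intro n k h1 hf hk
    have hne : n ≠ 0 := by omega
    unfold convertA chDigits
    rw [if_pos hne, List.reverse_cons]
    by_cases hq : PySem.Int.floordiv n k = 0
    · rw [if_neg (by simp [hq]), hq, chDigits_zero]
      simp
    · have hqpos : 1 ≤ PySem.Int.floordiv n k := by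
        have := PySem.Int.floordiv_nonneg (a := n) (b := k) (by omega) (by omega)
        omega
      have hqlt : PySem.Int.floordiv n k < n := by
        rw [PySem.Int.floordiv_eq_ediv_of_pos (by omega)]
        apply Int.ediv_lt_of_lt_mul (by omega)
        nlinarith
      rw [if_pos (by simpa using hq), ih _ k hqpos (by omega) hk]

-- the digit character is '0' exactly for digit 0 (any 0 ≤ d; out-of-range gives ' ')
theorem alphabet_zero_iff (d : Int) (hd : 0 ≤ d) :
    (((PySem.List.pyGet? pvAlphabet d).getD ' ') = '0') ↔ d = 0 := by
  by_cases h36 : d < 36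
  · interval_cases d <;> simp [pvAlphabet, PySem.List.pyGet?, PySem.List.pyIdx?]
  · have hnone : PySem.List.pyGet? pvAlphabet d = none := by
      rw [PySem.List.pyGet?_eq_none_iff]
      simp only [PySem.Raise.InRange, pvAlphabet]
      intro ⟨_, hlt⟩
      simp at hlt
      omega
    simp [hnone]
    omega

-- B's streaming pass, expressed over the digit-character list it consumes
def streamC : List Char → Int → List Char → Int
  | [], cnt, piece => if predB piece then cnt + 1 else cnt
  | c :: rest, cnt, piece =>
    if c = '0' then streamC rest (if predB piece then cnt + 1 else cnt) []
    else streamC rest cnt (c :: piece)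

theorem streamC_cons (c : Char) (rest : List Char) (cnt : Int) (piece : List Char) :
    streamC (c :: rest) cnt piece
      = if c = '0' then streamC rest (if predB piece then cnt + 1 else cnt) []
        else streamC rest cnt (c :: piece) := rfl

-- runB follows the digit-character list.
theorem runB_eq_streamC (fuel : Nat) :
    ∀ (n k cnt : Int) (piece : List Char), 0 ≤ n → n.toNat < fuel → 2 ≤ k →
      runB fuel n k cnt piece = streamC (chDigits fuel n k) cnt piece := by
  induction fuel with
  | zero => intro n _ _ _ _ h; omega
  | succ f ih =>
    intro n k cnt piece hn hf hk
    by_cases hne : n = 0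
    · subst hne
      simp [runB, chDigits, streamC, predB]
    · have hdpos : 0 ≤ PySem.Int.mod n k := PySem.Int.mod_nonneg n (by omega)
      have hqnn : 0 ≤ PySem.Int.floordiv n k :=
        PySem.Int.floordiv_nonneg (by omega) (by omega)
      have hqlt : PySem.Int.floordiv n k < n := by
        rw [PySem.Int.floordiv_eq_ediv_of_pos (by omega)]
        apply Int.ediv_lt_of_lt_mul (by omega)
        nlinarith [show 1 ≤ n by omega]
      unfold runB chDigits
      simp only [hne, if_true, ne_eq, not_false_eq_true]
      by_cases hd : PySem.Int.mod n k = 0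
      · rw [if_neg (by simpa using hd)]
        rw [show ((PySem.List.pyGet? pvAlphabet (PySem.Int.mod n k)).getD ' ') = '0' from
          (alphabet_zero_iff _ hdpos).mpr hd]
        rw [ih _ k _ [] hqnn (by omega) hk, streamC_cons, if_pos rfl]
        simp [predB]
      · rw [if_pos (by simpa using hd)]
        rw [ih _ k cnt _ hqnn (by omega) hk, streamC_cons,
          if_neg (by rw [alphabet_zero_iff _ hdpos]; exact hd)]
        simp [pvDigitsB, pvAlphabet]


-- the streaming invariant: count so far + prime pieces still to be produced
theorem streamC_eq_countP (ds : List Char) :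
    ∀ (cnt : Int) (piece : List Char),
      streamC ds cnt piece
        = cnt + ((((((splitL ds).headI.reverse ++ piece) :: ((splitL ds).tail.map List.reverse))).countP predB : Nat) : Int) := by
  induction ds with
  | nil =>
    intro cnt piece
    simp only [streamC, splitL, List.headI, List.tail, List.map, List.reverse_nil,
      List.nil_append, List.countP_cons, List.countP_nil]
    by_cases hp : predB piece <;> simp [hp]
  | cons c rest ih =>
    intro cnt piece
    by_cases hc : c = '0'
    · rw [streamC_cons, if_pos hc]
      rw [ih _ []]
      rw [show splitL (c :: rest) = [] :: splitL rest by simp [splitL, hc]]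
      simp only [List.headI, List.tail, List.reverse_nil, List.nil_append, List.countP_cons]
      rw [splitL_cons_shape rest]
      simp only [List.map_cons, List.countP_cons, List.append_nil]
      by_cases hp : predB piece
      · simp [hp]
        ring
      · simp [hp]
    · rw [streamC_cons, if_neg hc]
      rw [ih cnt (c :: piece)]
      rw [show splitL (c :: rest) = (c :: (splitL rest).headI) :: (splitL rest).tail by
        simp [splitL, hc]]
      simp

-- ===== VERDICT (by name: the statement is the Claim_ definition above) =====
theorem solution_spec : Claim_equal_solution := by
  intro n k _hdom hpre
  obtain ⟨hn, hk2, _hdigits⟩ := hpre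
  unfold Spec_solution solution solution_alt
  rcases eq_or_lt_of_le hn with h0 | hpos
  · -- n = 0: A converts to "0" and counts nothing; B's loop never runs
    subst h0
    have hd : PySem.Int.floordiv 0 k = 0 := by
      rw [PySem.Int.floordiv_eq_ediv_of_pos (by omega)]; simp
    have hm : PySem.Int.mod 0 k = 0 := by
      rw [PySem.Int.mod_eq_emod_of_pos (by omega)]; simp
    simp only [Int.toNat_zero, convertA, hd, hm]
    simp [runB]
    decide
  · -- n ≥ 1: both counts are countP predB over the same piece list
    rw [convertA_eq_chDigits (n.toNat + 1) n k (by omega) (by omega) hk2]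
    rw [splitOn_eq_splitL, splitL_reverse, fold_count, List.countP_reverse]
    rw [runB_eq_streamC (n.toNat + 1) n k 0 [] (by omega) (by omega) hk2]
    rw [streamC_eq_countP]
    rw [splitL_cons_shape (chDigits (n.toNat + 1) n k)]
    simp
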